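-- pv_equiv track=rewrite | github.com/fhta0/doc-helper | backend/app/services/rule_engine.py | _merge_consecutive_paragraphs
-- ===== SOURCE A (Python) =====
-- from typing import Dict, List, Any, Optional
--
-- def _merge_consecutive_paragraphs(para_locs: List[Dict[str, Any]]) -> List[str]:
--     """
--     Merge consecutive paragraph locations by index and line numbers.
--
--     Args:
--         para_locs: List of paragraph location dictionaries sorted by index
--
--     Returns:
--         List of merged location strings
--     """
--     if not para_locs:
--         return []
--
--     # Deduplicate by index (keep first occurrence)
--     seen_indices = set()
--     unique_locs = []
--     for loc in para_locs:
--         idx = loc.get("index", 0)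
--         if idx not in seen_indices:
--             seen_indices.add(idx)
--             unique_locs.append(loc)
--
--     merged = []
--     i = 0
--
--     while i < len(unique_locs):
--         start_idx = unique_locs[i].get("index", 0)
--         start_line = unique_locs[i].get("start_line", 1)
--         end_line = unique_locs[i].get("end_line", start_line)
--         j = i + 1
--
--         # Find consecutive indices with consecutive line numbers
--         while j < len(unique_locs):
--             next_idx = unique_locs[j].get("index", 0)
--             next_start = unique_locs[j].get("start_line", 1)
--             next_end = unique_locs[j].get("end_line", next_start)
--
--             # Check if paragraphs are consecutive and line numbers are also consecutive
--             if next_idx == start_idx + (j - i) and next_start == end_line + 1: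
--                 end_line = next_end
--                 j += 1
--             else:
--                 break
--
--         # Generate merged string
--         if j - i >= 3:
--             # Merge 3 or more consecutive
--             if start_line == end_line:
--                 merged.append(f"第{start_idx + 1}~{unique_locs[j - 1].get('index', 0) + 1}段(第{start_line}行)")
--             else:
--                 merged.append(f"第{start_idx + 1}~{unique_locs[j - 1].get('index', 0) + 1}段(第{start_line}~{end_line}行)")
--         else:
--             # Show individually
--             for k in range(i, j):
--                 idx = unique_locs[k].get("index", 0)
--                 s = unique_locs[k].get("start_line", 1)
--                 e = unique_locs[k].get("end_line", s)
--                 if s == e: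
--                     merged.append(f"第{idx + 1}段(第{s}行)")
--                 else:
--                     merged.append(f"第{idx + 1}段({s}~{e}行)")
--
--         i = j
--
--     return merged
-- ===== SOURCE B (Python) =====
-- from typing import Dict, List, Any
--
-- def _format_run(run):
--     if len(run) >= 3:
--         i0, s0, _ = run[0]
--         i1, _, e1 = run[-1]
--         if s0 == e1:
--             return [f"第{i0 + 1}~{i1 + 1}段(第{s0}行)"]
--         return [f"第{i0 + 1}~{i1 + 1}段(第{s0}~{e1}行)"]
--     return [f"第{i + 1}段(第{s}行)" if s == e else f"第{i + 1}段({s}~{e}行)"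
--             for i, s, e in run]
--
-- def _merge_consecutive_paragraphs(para_locs: List[Dict[str, Any]]) -> List[str]:
--     # Dedupe by index (keep first occurrence) and extract (index, start, end) triples.
--     seen = set()
--     trips = []
--     for loc in para_locs:
--         idx = loc.get("index", 0)
--         if idx not in seen:
--             seen.add(idx)
--             s = loc.get("start_line", 1)
--             trips.append((idx, s, loc.get("end_line", s)))
--     # One pass: accumulate the current run, flush when adjacency breaks.
--     out = []
--     cur = []
--     for t in trips:
--         if cur and t[0] == cur[-1][0] + 1 and t[1] == cur[-1][2] + 1:
--             cur.append(t)
--         else: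
--             out.extend(_format_run(cur))
--             cur = [t]
--     out.extend(_format_run(cur))
--     return out
-- ===== Notes on version B (the rewrite author's own statement) =====
-- stated objective: simpler
-- what changed: Replaces A's index-juggling outer/inner while loops over unique_locs by extracting (index, start_line, end_line) triples once and doing a single accumulate-and-flush pass that collects each consecutive run into an explicit group before formatting it.
import Mathlib
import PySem

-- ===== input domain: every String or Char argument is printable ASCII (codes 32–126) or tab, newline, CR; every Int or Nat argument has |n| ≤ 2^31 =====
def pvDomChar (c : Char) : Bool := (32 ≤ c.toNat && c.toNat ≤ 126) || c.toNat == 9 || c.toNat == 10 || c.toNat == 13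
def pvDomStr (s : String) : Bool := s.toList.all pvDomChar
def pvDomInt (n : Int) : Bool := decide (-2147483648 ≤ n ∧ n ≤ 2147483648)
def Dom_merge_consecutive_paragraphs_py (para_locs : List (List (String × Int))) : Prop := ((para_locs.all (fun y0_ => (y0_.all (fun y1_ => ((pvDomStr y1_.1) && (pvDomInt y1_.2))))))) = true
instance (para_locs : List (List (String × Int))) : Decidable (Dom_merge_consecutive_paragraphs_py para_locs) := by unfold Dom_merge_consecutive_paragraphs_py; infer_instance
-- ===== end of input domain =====

-- B replaces A's index-juggling nested while-loops by one accumulate-and-flush pass over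
-- extracted (index, start, end) triples; objective: simpler (no speed claim).

-- loc.get(key, default) on the dict (association list)
def pyget (loc : List (String × Int)) (k : String) (d : Int) : Int :=
  (PySem.Dict.mk loc).getD k d

-- ===== PORT A =====
-- the dedup loop: for loc in para_locs: if idx not in seen: seen.add(idx); unique_locs.append(loc)
def dedupA : List (List (String × Int)) → PySem.Set Int → List (List (String × Int)) → List (List (String × Int))
  | [], _, uniq => uniq
  | loc :: rest, seen, uniq =>
    let idx := pyget loc "index" 0
    if PySem.Set.contains seen idx then dedupA rest seen uniq
    else dedupA rest (PySem.Set.add seen idx) (uniq ++ [loc])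

-- the inner while loop: advances j while indices and line numbers stay consecutive
-- (the result carries the invariant j ≤ final j, used only for termination of outerA)
def innerA (uniq : List (List (String × Int))) (i : Nat) (start_idx : Int) (end_line : Int) (j : Nat) : {p : Nat × Int // j ≤ p.1} :=
  if h : j < uniq.length then
    let loc := uniq[j]
    let next_idx := pyget loc "index" 0
    let next_start := pyget loc "start_line" 1
    let next_end := pyget loc "end_line" next_start
    if next_idx = start_idx + ((j : Int) - (i : Int)) ∧ next_start = end_line + 1 then
      let r := innerA uniq i start_idx next_end (j + 1)
      ⟨r.val, Nat.le_of_succ_le r.property⟩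
    else ⟨(j, end_line), Nat.le_refl j⟩
  else ⟨(j, end_line), Nat.le_refl j⟩
termination_by uniq.length - j
decreasing_by exact Nat.sub_succ_lt_self _ _ h

-- the outer while loop over i
def outerA (uniq : List (List (String × Int))) (i : Nat) : List String :=
  if h : i < uniq.length then
    let loc := uniq[i]
    let start_idx := pyget loc "index" 0
    let start_line := pyget loc "start_line" 1
    let el0 := pyget loc "end_line" start_line
    let r := innerA uniq i start_idx el0 (i + 1)
    let j := r.val.1
    let end_line := r.val.2
    let chunk : List String :=
      if 3 ≤ j - i then
        let lastIdx := pyget (uniq.getD (j - 1) []) "index" 0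
        if start_line = end_line then
          ["第" ++ PySem.Int.toStr (start_idx + 1) ++ "~" ++ PySem.Int.toStr (lastIdx + 1) ++
            "段(第" ++ PySem.Int.toStr start_line ++ "行)"]
        else
          ["第" ++ PySem.Int.toStr (start_idx + 1) ++ "~" ++ PySem.Int.toStr (lastIdx + 1) ++
            "段(第" ++ PySem.Int.toStr start_line ++ "~" ++ PySem.Int.toStr end_line ++ "行)"]
      else
        (List.range' i (j - i)).map (fun k =>
          let lk := uniq.getD k []
          let idx := pyget lk "index" 0
          let s := pyget lk "start_line" 1
          let e := pyget lk "end_line" s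
          if s = e then
            "第" ++ PySem.Int.toStr (idx + 1) ++ "段(第" ++ PySem.Int.toStr s ++ "行)"
          else
            "第" ++ PySem.Int.toStr (idx + 1) ++ "段(" ++ PySem.Int.toStr s ++ "~" ++ PySem.Int.toStr e ++ "行)")
    chunk ++ outerA uniq j
  else []
termination_by uniq.length - i
decreasing_by
  exact Nat.sub_lt_sub_left h
    (Nat.lt_of_succ_le (innerA uniq i (pyget uniq[i] "index" 0)
      (pyget uniq[i] "end_line" (pyget uniq[i] "start_line" 1)) (i + 1)).property)

def merge_consecutive_paragraphs_py (para_locs : List (List (String × Int))) : List String :=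
  if para_locs = [] then []
  else outerA (dedupA para_locs PySem.Set.empty []) 0

-- ===== PORT B =====
-- dedupe by index and extract (index, start_line, end_line) triples in one loop
def tripsB : List (List (String × Int)) → PySem.Set Int → List (Int × Int × Int) → List (Int × Int × Int)
  | [], _, trips => trips
  | loc :: rest, seen, trips =>
    let idx := pyget loc "index" 0
    if PySem.Set.contains seen idx then tripsB rest seen trips
    else
      let s := pyget loc "start_line" 1
      tripsB rest (PySem.Set.add seen idx) (trips ++ [(idx, s, pyget loc "end_line" s)])

def fmtTripB (t : Int × Int × Int) : String :=
  if t.2.1 = t.2.2 then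
    "第" ++ PySem.Int.toStr (t.1 + 1) ++ "段(第" ++ PySem.Int.toStr t.2.1 ++ "行)"
  else
    "第" ++ PySem.Int.toStr (t.1 + 1) ++ "段(" ++ PySem.Int.toStr t.2.1 ++ "~" ++ PySem.Int.toStr t.2.2 ++ "行)"

def formatRunB (run : List (Int × Int × Int)) : List String :=
  if 3 ≤ run.length then
    let h := run.headD (0, 0, 0)
    let l := run.getLastD (0, 0, 0)
    if h.2.1 = l.2.2 then
      ["第" ++ PySem.Int.toStr (h.1 + 1) ++ "~" ++ PySem.Int.toStr (l.1 + 1) ++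
        "段(第" ++ PySem.Int.toStr h.2.1 ++ "行)"]
    else
      ["第" ++ PySem.Int.toStr (h.1 + 1) ++ "~" ++ PySem.Int.toStr (l.1 + 1) ++
        "段(第" ++ PySem.Int.toStr h.2.1 ++ "~" ++ PySem.Int.toStr l.2.2 ++ "行)"]
  else run.map fmtTripB

-- accumulate the current run 'cur', flushing via formatRunB when adjacency breaks
def loopB : List (Int × Int × Int) → List String → List (Int × Int × Int) → List String
  | [], out, cur => out ++ formatRunB cur
  | t :: rest, out, cur =>
    if cur ≠ [] ∧ t.1 = (cur.getLastD (0, 0, 0)).1 + 1 ∧ t.2.1 = (cur.getLastD (0, 0, 0)).2.2 + 1 then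
      loopB rest out (cur ++ [t])
    else loopB rest (out ++ formatRunB cur) [t]

def merge_consecutive_paragraphs_py_alt (para_locs : List (List (String × Int))) : List String :=
  loopB (tripsB para_locs PySem.Set.empty []) [] []

-- ===== PRECONDITION & SPEC =====
def Spec_merge_consecutive_paragraphs_py (para_locs : List (List (String × Int))) (out : List String) : Prop := out = merge_consecutive_paragraphs_py_alt para_locs
instance (para_locs : List (List (String × Int))) (out : List String) : Decidable (Spec_merge_consecutive_paragraphs_py para_locs out) := by unfold Spec_merge_consecutive_paragraphs_py; infer_instance

-- ===== CLAIM (what is proved, stated in full; the proofs are below) =====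
def Claim_equal_merge_consecutive_paragraphs_py : Prop := ∀ (para_locs : List (List (String × Int))), Dom_merge_consecutive_paragraphs_py para_locs → Spec_merge_consecutive_paragraphs_py para_locs (merge_consecutive_paragraphs_py para_locs)

-- ===== LEMMAS AND PROOFS =====

-- triple extraction of one dict
def extT (loc : List (String × Int)) : Int × Int × Int :=
  (pyget loc "index" 0, pyget loc "start_line" 1, pyget loc "end_line" (pyget loc "start_line" 1))

-- span of the maximal consecutive run after a previous element (pidx, -, pend):
-- returns (run, final end_line, rest)
def spanG (pidx pend : Int) : List (Int × Int × Int) → List (Int × Int × Int) × Int × List (Int × Int × Int)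
  | [] => ([], pend, [])
  | t :: rest =>
    if t.1 = pidx + 1 ∧ t.2.1 = pend + 1 then
      let r := spanG t.1 t.2.2 rest
      (t :: r.1, r.2.1, r.2.2)
    else ([], pend, t :: rest)

theorem spanG_rest_le (pidx pend : Int) (tl : List (Int × Int × Int)) :
    (spanG pidx pend tl).2.2.length ≤ tl.length := by
  fun_induction spanG with
  | case1 => simp
  | case2 pidx pend t rest hc r ih => simpa [r] using Nat.le_succ_of_le ih
  | case3 => simp

-- canonical processing of the triple list
def procT : List (Int × Int × Int) → List String
  | [] => []
  | t :: rest =>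
    let r := spanG t.1 t.2.2 rest
    formatRunB (t :: r.1) ++ procT r.2.2
termination_by l => l.length
decreasing_by
  have := spanG_rest_le t.1 t.2.2 rest
  simp only [List.length_cons]; omega

theorem lastD_snd (l : List (Int × Int × Int)) (t d : Int × Int × Int) :
    ((t :: l).getLastD d).2.2 = (l.map (·.2.2)).getLastD t.2.2 := by
  rcases l with _ | ⟨a, m⟩
  · rfl
  · have hne : (a :: m : List (Int × Int × Int)) ≠ [] := by simp
    rw [List.getLastD_eq_getLast?, List.getLastD_eq_getLast?, List.getLast?_cons,
      List.getLast?_map, List.getLast?_eq_some_getLast hne]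
    simp

theorem dedupA_append (ls : List (List (String × Int))) (seen : PySem.Set Int)
    (uniq : List (List (String × Int))) :
    dedupA ls seen uniq = uniq ++ dedupA ls seen [] := by
  induction ls generalizing seen uniq with
  | nil => simp [dedupA]
  | cons loc rest ih =>
    simp only [dedupA]
    split
    · exact ih _ _
    · simp only [List.nil_append]
      rw [ih _ (uniq ++ [loc]), ih _ [loc]]; simp

theorem tripsB_eq (ls : List (List (String × Int))) (seen : PySem.Set Int)
    (acc : List (Int × Int × Int)) :
    tripsB ls seen acc = acc ++ (dedupA ls seen []).map extT := by
  induction ls generalizing seen acc with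
  | nil => simp [tripsB, dedupA]
  | cons loc rest ih =>
    simp only [tripsB, dedupA]
    split
    · exact ih _ _
    · simp only [List.nil_append]
      rw [ih, dedupA_append _ _ [loc]]; simp [extT]

theorem spanG_spec (tl : List (Int × Int × Int)) (pidx pend : Int) :
    (spanG pidx pend tl).1 ++ (spanG pidx pend tl).2.2 = tl ∧
    (spanG pidx pend tl).2.1 = ((spanG pidx pend tl).1.map (·.2.2)).getLastD pend := by
  fun_induction spanG with
  | case1 => simp
  | case2 pidx pend t rest hc r ih =>
    simp only [r] at ih ⊢
    refine ⟨by simp [ih.1], ?_⟩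
    rw [ih.2]
    rcases h1 : (spanG t.1 t.2.2 rest).1 with _ | ⟨a, l⟩ <;> simp [List.getLast?_cons]
  | case3 => simp

theorem loopB_inv (tl : List (Int × Int × Int)) (out : List String)
    (cur : List (Int × Int × Int)) (h : cur ≠ []) :
    loopB tl out cur =
      out ++ formatRunB (cur ++ (spanG (cur.getLastD (0,0,0)).1 (cur.getLastD (0,0,0)).2.2 tl).1) ++
        procT (spanG (cur.getLastD (0,0,0)).1 (cur.getLastD (0,0,0)).2.2 tl).2.2 := by
  induction tl generalizing out cur with
  | nil => simp [loopB, spanG, procT]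
  | cons t rest ih =>
    simp only [loopB]
    by_cases hc : t.1 = (cur.getLastD (0,0,0)).1 + 1 ∧ t.2.1 = (cur.getLastD (0,0,0)).2.2 + 1
    · rw [if_pos ⟨h, hc.1, hc.2⟩, ih _ _ (by simp)]
      have hlast : ((cur ++ [t]).getLastD (0,0,0)) = t := by
        simp [List.getLastD_eq_getLast?]
      rw [hlast]
      conv_rhs => rw [spanG, if_pos hc]
      simp [List.append_assoc]
    · rw [if_neg (by tauto), ih _ _ (by simp)]
      conv_rhs => rw [spanG, if_neg hc]
      simp only [List.getLastD_eq_getLast?, List.getLast?_singleton, Option.getD_some]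
      rw [procT]
      simp [List.append_assoc]

theorem loopB_eq_procT (tl : List (Int × Int × Int)) : loopB tl [] [] = procT tl := by
  cases tl with
  | nil => simp [loopB, formatRunB, procT]
  | cons t rest =>
    simp only [loopB, ne_eq, not_true_eq_false, false_and, if_false, formatRunB]
    rw [loopB_inv _ _ _ (by simp)]
    simp only [List.getLastD_eq_getLast?, List.getLast?_singleton, Option.getD_some]
    rw [procT]
    simp

theorem innerA_eq_spanG (uniq : List (List (String × Int))) (i : Nat) (start_idx : Int)
    (pend : Int) (j : Nat) (_hj : j ≤ uniq.length) (pidx : Int)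
    (hp : start_idx + ((j : Int) - (i : Int)) = pidx + 1) :
    (innerA uniq i start_idx pend j).val =
      (j + (spanG pidx pend ((uniq.map extT).drop j)).1.length,
       (spanG pidx pend ((uniq.map extT).drop j)).2.1) := by
  rw [innerA]
  split
  · next h =>
    have hdrop : (uniq.map extT).drop j = extT uniq[j] :: (uniq.map extT).drop (j + 1) := by
      rw [List.drop_eq_getElem_cons (by simpa using h)]; simp
    rw [hdrop, spanG]
    by_cases hcond : pyget uniq[j] "index" 0 = start_idx + ((j : Int) - (i : Int)) ∧
        pyget uniq[j] "start_line" 1 = pend + 1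
    · rw [if_pos hcond, if_pos (show (extT uniq[j]).1 = pidx + 1 ∧ (extT uniq[j]).2.1 = pend + 1 by
        refine ⟨?_, hcond.2⟩; simp only [extT]; omega)]
      rw [innerA_eq_spanG uniq i start_idx
        (pyget uniq[j] "end_line" (pyget uniq[j] "start_line" 1)) (j + 1) (by omega)
        (extT uniq[j]).1 (by simp only [extT]; push_cast; omega)]
      simp only [extT, List.length_cons, Prod.mk.injEq]
      exact ⟨by omega, trivial⟩
    · rw [if_neg hcond, if_neg (show ¬ ((extT uniq[j]).1 = pidx + 1 ∧ (extT uniq[j]).2.1 = pend + 1) by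
        simp only [extT, not_and]; intro h1 h2; exact hcond ⟨by omega, h2⟩)]
      simp
  · next h =>
    have hnil : (uniq.map extT).drop j = [] := by
      apply List.drop_eq_nil_of_le; simpa using Nat.le_of_not_lt h
    rw [hnil, spanG]; simp
termination_by uniq.length - j

theorem outerA_eq_procT (uniq : List (List (String × Int))) (i : Nat) :
    outerA uniq i = procT ((uniq.map extT).drop i) := by
  rw [outerA]
  split
  · next h =>
    have hdrop : (uniq.map extT).drop i = extT uniq[i] :: (uniq.map extT).drop (i + 1) := by
      rw [List.drop_eq_getElem_cons (by simpa using h)]; simp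
    have hinner := innerA_eq_spanG uniq i (pyget uniq[i] "index" 0)
        (pyget uniq[i] "end_line" (pyget uniq[i] "start_line" 1)) (i + 1) (by omega)
        (pyget uniq[i] "index" 0) (by push_cast; ring)
    rw [hdrop, procT]
    simp only [hinner]
    have e1 : (extT uniq[i]).1 = pyget uniq[i] "index" 0 := rfl
    have e2 : (extT uniq[i]).2.2 = pyget uniq[i] "end_line" (pyget uniq[i] "start_line" 1) := rfl
    rw [e1, e2]
    have hspan := spanG_spec ((uniq.map extT).drop (i + 1)) (pyget uniq[i] "index" 0)
        (pyget uniq[i] "end_line" (pyget uniq[i] "start_line" 1))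
    generalize hsp : spanG (pyget uniq[i] "index" 0)
        (pyget uniq[i] "end_line" (pyget uniq[i] "start_line" 1))
        ((uniq.map extT).drop (i + 1)) = R at hspan ⊢
    obtain ⟨hsplit, hend⟩ := hspan
    have hlen : i + 1 + R.1.length ≤ uniq.length := by
      have := congrArg List.length hsplit
      simp at this
      omega
    have hrest : R.2.2 = (uniq.map extT).drop (i + 1 + R.1.length) := by
      have := congrArg (List.drop R.1.length) hsplit
      rw [List.drop_left, List.drop_drop] at this
      rw [this]
    have houter : outerA uniq (i + 1 + R.1.length) = procT R.2.2 := by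
      rw [outerA_eq_procT uniq (i + 1 + R.1.length), hrest]
    rw [houter]
    congr 1
    -- the chunk equals formatRunB of the group
    have hcons : (extT uniq[i] :: R.1) ++ R.2.2 = (uniq.map extT).drop i := by
      rw [hdrop, List.cons_append, hsplit]
    have hget : ∀ k, k < R.1.length + 1 →
        (extT uniq[i] :: R.1).getD k (0,0,0) = extT (uniq.getD (i + k) []) := by
      intro k hk
      have h1 : ((extT uniq[i] :: R.1) ++ R.2.2)[k]? = (extT uniq[i] :: R.1)[k]? :=
        List.getElem?_append_left (by simpa using hk)
      have h2 : ((uniq.map extT).drop i)[k]? = (uniq.map extT)[i + k]? := by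
        rw [List.getElem?_drop]
      have h3 : (uniq.map extT)[i + k]? = some (extT uniq[i + k]) := by
        rw [List.getElem?_map, List.getElem?_eq_getElem (by simpa using by omega)]
        simp
      have h4 : uniq.getD (i + k) [] = uniq[i + k] := by
        rw [List.getD_eq_getElem?_getD, List.getElem?_eq_getElem (by omega)]
        simp
      rw [List.getD_eq_getElem?_getD, h1.symm, hcons, h2, h3, h4]
      simp
    have hlast : (extT uniq[i] :: R.1).getLastD (0,0,0) = extT (uniq.getD (i + R.1.length) []) := by
      rw [List.getLastD_eq_getLast?, List.getLast?_eq_getElem?]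
      have := hget R.1.length (by omega)
      rw [List.getD_eq_getElem?_getD] at this
      simpa using this
    rw [formatRunB]
    by_cases h3 : 3 ≤ R.1.length + 1
    · rw [if_pos (show 3 ≤ i + 1 + R.1.length - i by omega),
          if_pos (show 3 ≤ (extT uniq[i] :: R.1).length by simp; omega)]
      have hli : pyget (uniq.getD (i + 1 + R.1.length - 1) []) "index" 0 =
          ((extT uniq[i] :: R.1).getLastD (0,0,0)).1 := by
        rw [hlast, show i + 1 + R.1.length - 1 = i + R.1.length from by omega]
        rfl
      have hendl : R.2.1 = ((extT uniq[i] :: R.1).getLastD (0,0,0)).2.2 := by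
        rw [hend, lastD_snd, e2]
      simp only [List.headD_cons]
      rw [← hendl, ← hli]
      rfl
    · rw [if_neg (show ¬ 3 ≤ i + 1 + R.1.length - i by omega),
          if_neg (show ¬ 3 ≤ (extT uniq[i] :: R.1).length by simp; omega)]
      rw [show i + 1 + R.1.length - i = R.1.length + 1 from by omega]
      apply List.ext_getElem
      · simp [List.length_range']
      · intro k hk1 hk2
        simp only [List.getElem_map, List.getElem_range']
        rw [show i + 1 * k = i + k from by omega]
        have h6 := hget k (by simpa [List.length_range'] using hk1)
        rw [List.getD_eq_getElem?_getD, List.getElem?_eq_getElem (by simpa using hk2),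
          Option.getD_some] at h6
        rw [h6]
        rfl
  · next h =>
    have hnil : (uniq.map extT).drop i = [] := by
      apply List.drop_eq_nil_of_le; simpa using Nat.le_of_not_lt h
    rw [hnil, procT]
termination_by uniq.length - i
decreasing_by omega

-- ===== VERDICT (by name: the statement is the Claim_ definition above) =====
theorem merge_consecutive_paragraphs_py_spec : Claim_equal_merge_consecutive_paragraphs_py := by
  intro para_locs _
  unfold Spec_merge_consecutive_paragraphs_py merge_consecutive_paragraphs_py
    merge_consecutive_paragraphs_py_alt
  rw [tripsB_eq, loopB_eq_procT]
  split
  · next h => subst h; simp [dedupA, procT]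
  · rw [outerA_eq_procT]; rfl
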